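-- pv_equiv track=rewrite | github.com/aHappend/Crane | search/scheduler_search.py | _bw1_eq14_state_bounds_from_forward_end_md
-- ===== SOURCE A (Python) =====
-- from typing import Sequence
--
-- def _bw1_initial_counts_from_forward_end_md(end_md: Sequence[int]) -> list[int]:
--     """Eq.14-style prefix counts for backward-only preprocessing."""
--
--     rev = [int(v) for v in reversed(end_md)]
--     init = [0 for _ in rev]
--     for j in range(1, len(rev)):
--         init[j] = max(0, rev[j - 1] - rev[j])
--     return init
--
-- def _empty_state_bounds(num_states: int, num_blocks: int) -> list[list[int | None]]:
--     return [[None for _ in range(num_blocks)] for _ in range(num_states)]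
--
-- def _bw1_eq14_state_bounds_from_forward_end_md(
--     end_md: Sequence[int],
--     total_sub_batches: int,
-- ) -> tuple[list[list[int | None]], list[list[int | None]], list[int], list[int]]:
--     n = len(end_md)
--     num_states = 2 * n - 1
--     lower = _empty_state_bounds(num_states, n)
--     upper = _empty_state_bounds(num_states, n)
--
--     stored_counts = [max(0, int(total_sub_batches) - int(v)) for v in end_md]
--     final_counts = [stored_counts[n - 1 - j] for j in range(n)]
--     init_counts = _bw1_initial_counts_from_forward_end_md(end_md)
--
--     for j in range(n):
--         init_j = int(init_counts[j])
--         final_j = int(final_counts[j])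
--         for i in range(0, j):
--             lower[i][j] = init_j
--             upper[i][j] = init_j
--         finish = n + j - 1
--         for i in range(finish, num_states):
--             lower[i][j] = final_j
--             upper[i][j] = final_j
--
--     return lower, upper, init_counts, final_counts
-- ===== SOURCE B (Python) =====
-- def _bw1_eq14_state_bounds_from_forward_end_md(end_md, total_sub_batches):
--     t = int(total_sub_batches)
--     rev = [int(v) for v in reversed(end_md)]
--     n = len(rev)
--     if n == 0:
--         return [], [], [], []
--     final_counts = [max(0, t - v) for v in rev]
--     init_counts = [0] + [max(0, a - b) for a, b in zip(rev, rev[1:])]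
--
--     # state row 0, built directly
--     row = [None] * n
--     for j in range(1, n):
--         row[j] = init_counts[j]
--     if n == 1:
--         row[0] = final_counts[0]
--     lower = [row[:]]
--     # each next row differs from the previous by at most two point updates:
--     # the diagonal cell i drops its init value, cell i-n+1 acquires its final value
--     for i in range(1, 2 * n - 1):
--         if i < n:
--             row[i] = None
--         if i - n + 1 >= 0:
--             row[i - n + 1] = final_counts[i - n + 1]
--         lower.append(row[:])
--     upper = [r[:] for r in lower]
--     return lower, upper, init_counts, final_counts
-- ===== Notes on version B (the rewrite author's own statement) =====
-- stated objective: alternative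
-- what changed: A preallocates two None matrices and fills them column by column with two range-loops of element writes per column; B builds the state rows incrementally in one forward pass over states, maintaining a single sliding row that changes by at most two point updates per state (the diagonal cell drops its init value, cell i-n+1 acquires its final value) and snapshotting a slice copy per state, with init_counts built from zipped adjacent pairs of the reversed list instead of A's mutate-in-place loop.
import Mathlib
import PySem

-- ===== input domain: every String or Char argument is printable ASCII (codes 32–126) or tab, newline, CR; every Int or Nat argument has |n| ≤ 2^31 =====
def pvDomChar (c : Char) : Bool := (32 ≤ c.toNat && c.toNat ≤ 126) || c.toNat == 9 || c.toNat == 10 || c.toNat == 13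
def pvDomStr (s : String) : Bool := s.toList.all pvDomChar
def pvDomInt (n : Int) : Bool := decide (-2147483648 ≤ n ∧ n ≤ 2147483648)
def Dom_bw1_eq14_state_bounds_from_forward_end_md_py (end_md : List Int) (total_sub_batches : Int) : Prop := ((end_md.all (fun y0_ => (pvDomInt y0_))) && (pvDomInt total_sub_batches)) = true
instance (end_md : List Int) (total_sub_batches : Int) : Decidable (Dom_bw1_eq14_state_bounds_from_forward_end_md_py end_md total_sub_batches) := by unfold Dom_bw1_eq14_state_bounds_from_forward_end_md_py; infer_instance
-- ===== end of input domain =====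

-- B replaces A's column-by-column fills of two preallocated None matrices by a single forward
-- pass over states that maintains one sliding row, applying at most two point updates per state
-- and snapshotting it (objective: alternative decomposition; equal return value proved below).

-- ===== PORT A =====
-- helper _bw1_initial_counts_from_forward_end_md; Python indexing rev[j-1]/rev[j] is always in
-- range (1 ≤ j < len(rev)), so pyGetD with default 0 is exact here.
def pvInitialCounts (end_md : List Int) : List Int :=
  let rev := end_md.reverse.map (fun v => v)
  let init := rev.map (fun _ => (0 : Int))
  (PySem.List.pyRange 1 (rev.length : Int)).foldl
    (fun acc j => acc.set j.toNat
      (max 0 (PySem.List.pyGetD rev (j - 1) 0 - PySem.List.pyGetD rev j 0))) init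

-- helper _empty_state_bounds (range(num_states) with num_states = -1 is empty, as pyRange is)
def pvEmptyStateBounds (numStates numBlocks : Int) : List (List (Option Int)) :=
  (PySem.List.pyRange 0 numStates).map (fun _ =>
    (PySem.List.pyRange 0 numBlocks).map (fun _ => (none : Option Int)))

-- the loop indices i, j are always ≥ 0 and in range, so i.toNat / pyGetD are exact
def bw1_eq14_state_bounds_from_forward_end_md_py (end_md : List Int) (total_sub_batches : Int) : List (List (Option Int)) × List (List (Option Int)) × List Int × List Int :=
  let n : Int := end_md.length
  let numStates : Int := 2 * n - 1
  let lower := pvEmptyStateBounds numStates n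
  let upper := pvEmptyStateBounds numStates n
  let stored := end_md.map (fun v => max 0 (total_sub_batches - v))
  let final := (PySem.List.pyRange 0 n).map (fun j => PySem.List.pyGetD stored (n - 1 - j) 0)
  let init := pvInitialCounts end_md
  let lu := (PySem.List.pyRange 0 n).foldl
    (fun (lu : List (List (Option Int)) × List (List (Option Int))) j =>
      let initj := PySem.List.pyGetD init j 0
      let finalj := PySem.List.pyGetD final j 0
      let lu1 := (PySem.List.pyRange 0 j).foldl
        (fun (p : List (List (Option Int)) × List (List (Option Int))) i =>
          (p.1.modify i.toNat (fun row => row.set j.toNat (some initj)),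
           p.2.modify i.toNat (fun row => row.set j.toNat (some initj)))) lu
      let finish := n + j - 1
      (PySem.List.pyRange finish numStates).foldl
        (fun (p : List (List (Option Int)) × List (List (Option Int))) i =>
          (p.1.modify i.toNat (fun row => row.set j.toNat (some finalj)),
           p.2.modify i.toNat (fun row => row.set j.toNat (some finalj)))) lu1)
    (lower, upper)
  (lu.1, lu.2, init, final)

-- ===== PORT B =====
-- transliteration of Source B: early return on empty input; final/init counts from the reversed
-- list (init from zipped adjacent pairs); state row 0 built directly, then one forward pass
-- over states i = 1 .. 2n-2 maintaining a sliding row with at most two point updates per state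
-- (row[i] := None while i < n; row[i-n+1] := final[i-n+1] once i-n+1 >= 0), snapshotting the
-- row after each state.  All indices written are in range, so .toNat / pyGetD are exact.
def bw1_eq14_state_bounds_from_forward_end_md_py_alt (end_md : List Int) (total_sub_batches : Int) : List (List (Option Int)) × List (List (Option Int)) × List Int × List Int :=
  let rev := end_md.reverse.map (fun v => v)
  let n : Int := rev.length
  if n = 0 then ([], [], [], []) else
  let final_counts := rev.map (fun v => max 0 (total_sub_batches - v))
  let init_counts := 0 :: (rev.zip rev.tail).map (fun p => max 0 (p.1 - p.2))
  let row0 := rev.map (fun _ => (none : Option Int))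
  let row1 := (PySem.List.pyRange 1 n).foldl
    (fun r j => r.set j.toNat (some (PySem.List.pyGetD init_counts j 0))) row0
  let row2 := if n = 1 then row1.set 0 (some (PySem.List.pyGetD final_counts 0 0)) else row1
  let st := (PySem.List.pyRange 1 (2 * n - 1)).foldl
    (fun (st : List (Option Int) × List (List (Option Int))) i =>
      let r1 := if i < n then st.1.set i.toNat none else st.1
      let r2 := if 0 ≤ i - n + 1 then
          r1.set (i - n + 1).toNat (some (PySem.List.pyGetD final_counts (i - n + 1) 0))
        else r1
      (r2, st.2 ++ [r2]))
    (row2, [row2])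
  let lower := st.2
  let upper := lower.map (fun r => r.map (fun x => x))
  (lower, upper, init_counts, final_counts)

-- ===== PRECONDITION & SPEC =====
def Spec_bw1_eq14_state_bounds_from_forward_end_md_py (end_md : List Int) (total_sub_batches : Int) (out : List (List (Option Int)) × List (List (Option Int)) × List Int × List Int) : Prop := out = bw1_eq14_state_bounds_from_forward_end_md_py_alt end_md total_sub_batches
instance (end_md : List Int) (total_sub_batches : Int) (out : List (List (Option Int)) × List (List (Option Int)) × List Int × List Int) : Decidable (Spec_bw1_eq14_state_bounds_from_forward_end_md_py end_md total_sub_batches out) := by unfold Spec_bw1_eq14_state_bounds_from_forward_end_md_py; infer_instance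

-- ===== CLAIM (what is proved, stated in full; the proofs are below) =====
def Claim_equal_bw1_eq14_state_bounds_from_forward_end_md_py : Prop := ∀ (end_md : List Int) (total_sub_batches : Int), Dom_bw1_eq14_state_bounds_from_forward_end_md_py end_md total_sub_batches → Spec_bw1_eq14_state_bounds_from_forward_end_md_py end_md total_sub_batches (bw1_eq14_state_bounds_from_forward_end_md_py end_md total_sub_batches)

-- ===== LEMMAS AND PROOFS =====

-- canonical row: cell (i, j) of both matrices as a direct formula
def pvBRow (n : Int) (final_counts init_counts : List Int) (i : Int) : List (Option Int) :=
  (PySem.List.pyRange 0 n).map (fun j =>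
    if j ≤ i - n + 1 then some (PySem.List.pyGetD final_counts j 0)
    else if i < j then some (PySem.List.pyGetD init_counts j 0)
    else none)

-- canonical form of the result, which both ports are proved to equal
def pvCanon (end_md : List Int) (total_sub_batches : Int) : List (List (Option Int)) × List (List (Option Int)) × List Int × List Int :=
  let n : Int := end_md.length
  let vals := end_md.map (fun v => v)
  let final_counts := (PySem.List.pyRange 0 n).map
    (fun j => max 0 (total_sub_batches - PySem.List.pyGetD vals (n - 1 - j) 0))
  let init_counts := (PySem.List.pyRange 0 n).map (fun j =>
    if j = 0 then (0 : Int)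
    else max 0 (PySem.List.pyGetD vals (n - j) 0 - PySem.List.pyGetD vals (n - 1 - j) 0))
  let lower := (PySem.List.pyRange 0 (2 * n - 1)).map (fun i => pvBRow n final_counts init_counts i)
  let upper := (PySem.List.pyRange 0 (2 * n - 1)).map (fun i => pvBRow n final_counts init_counts i)
  (lower, upper, init_counts, final_counts)

theorem pvFoldSet_length {α : Type} (f : Int → α) (js : List Int) (l : List α) :
    (js.foldl (fun acc j => acc.set j.toNat (f j)) l).length = l.length := by
  induction js generalizing l with
  | nil => rfl
  | cons x xs ih => simpa using ih (l.set x.toNat (f x))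

theorem pvFoldSet_getElem? {α : Type} (f : Int → α) (n : Nat) :
    ∀ (a : Int), 0 ≤ a → ∀ (l : List α) (k : Nat),
    ((PySem.List.pyRange a (a + n)).foldl (fun acc j => acc.set j.toNat (f j)) l)[k]? =
      if a ≤ (k : Int) ∧ (k : Int) < a + n ∧ k < l.length then some (f k) else l[k]? := by
  induction n with
  | zero =>
      intro a ha l k
      rw [show a + ((0 : Nat) : Int) = a by simp, PySem.List.pyRange_one_eq_nil le_rfl]
      simp only [List.foldl_nil]
      rw [if_neg (by omega)]
  | succ n ih =>
      intro a ha l k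
      rw [show a + ((n + 1 : Nat) : Int) = (a + n) + 1 by push_cast; ring,
          PySem.List.pyRange_one_succ_right (by omega), List.foldl_append]
      simp only [List.foldl_cons, List.foldl_nil]
      rw [List.getElem?_set, ih a ha l k, pvFoldSet_length]
      by_cases hk : (k : Int) = a + n
      · have h1 : (a + n).toNat = k := by omega
        rw [if_pos h1]
        by_cases hl : k < l.length
        · rw [if_pos (by omega : (a + n).toNat < l.length),
              if_pos (show a ≤ (k:Int) ∧ (k:Int) < a + n + 1 ∧ k < l.length from ⟨by omega, by omega, hl⟩), hk]
        · rw [if_neg (by omega), if_neg (by omega)]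
          exact (List.getElem?_eq_none (by omega)).symm
      · rw [if_neg (by omega)]
        by_cases hc : a ≤ (k : Int) ∧ (k : Int) < a + n ∧ k < l.length
        · rw [if_pos hc, if_pos (by omega)]
        · rw [if_neg hc, if_neg (by omega)]

theorem pvFoldModify_getElem? {α : Type} (g : α → α) (n : Nat) :
    ∀ (a : Int), 0 ≤ a → ∀ (m : List α) (k : Nat),
    ((PySem.List.pyRange a (a + n)).foldl (fun acc i => acc.modify i.toNat g) m)[k]? =
      if a ≤ (k : Int) ∧ (k : Int) < a + n then m[k]?.map g else m[k]? := by
  induction n with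
  | zero =>
      intro a ha m k
      rw [show a + ((0 : Nat) : Int) = a by simp, PySem.List.pyRange_one_eq_nil le_rfl]
      simp only [List.foldl_nil]
      rw [if_neg (by omega)]
  | succ n ih =>
      intro a ha m k
      rw [show a + ((n + 1 : Nat) : Int) = (a + n) + 1 by push_cast; ring,
          PySem.List.pyRange_one_succ_right (by omega), List.foldl_append]
      simp only [List.foldl_cons, List.foldl_nil]
      rw [List.getElem?_modify, ih a ha m k]
      by_cases hk : (k : Int) = a + n
      · have h1 : (a + n).toNat = k := by omega
        rw [if_neg (by omega), if_pos (by omega)]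
        simp [h1]
      · have h1 : ¬ ((a + n).toNat = k) := by omega
        simp only [h1, if_false]
        by_cases hc : a ≤ (k : Int) ∧ (k : Int) < a + n
        · rw [if_pos hc, if_pos (by omega)]
          cases m[k]? <;> rfl
        · rw [if_neg hc, if_neg (by omega)]
          cases m[k]? <;> rfl

theorem pvFoldSet_getElem?' {α : Type} (f : Int → α) (a b : Int) (ha : 0 ≤ a) (l : List α) (k : Nat) :
    ((PySem.List.pyRange a b).foldl (fun acc j => acc.set j.toNat (f j)) l)[k]? =
      if a ≤ (k : Int) ∧ (k : Int) < b ∧ k < l.length then some (f k) else l[k]? := by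
  by_cases hb : b ≤ a
  · rw [PySem.List.pyRange_one_eq_nil hb]
    simp only [List.foldl_nil]
    rw [if_neg (by omega)]
  · have h := pvFoldSet_getElem? f (b - a).toNat a ha l k
    rw [show a + (((b - a).toNat : Nat) : Int) = b by omega] at h
    exact h

theorem pvFoldModify_getElem?' {α : Type} (g : α → α) (a b : Int) (ha : 0 ≤ a) (m : List α) (k : Nat) :
    ((PySem.List.pyRange a b).foldl (fun acc i => acc.modify i.toNat g) m)[k]? =
      if a ≤ (k : Int) ∧ (k : Int) < b then m[k]?.map g else m[k]? := by
  by_cases hb : b ≤ a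
  · rw [PySem.List.pyRange_one_eq_nil hb]
    simp only [List.foldl_nil]
    rw [if_neg (by omega)]
  · have h := pvFoldModify_getElem? g (b - a).toNat a ha m k
    rw [show a + (((b - a).toNat : Nat) : Int) = b by omega] at h
    exact h

theorem pvMapRange_getElem? {α : Type} (f : Int → α) (N : Int) (m : Nat) :
    ((PySem.List.pyRange 0 N).map f)[m]? = if (m : Int) < N then some (f m) else none := by
  rw [PySem.List.pyRange_one, List.map_map, List.getElem?_map]
  by_cases h : m < (N - 0).toNat
  · rw [List.getElem?_range h, if_pos (by omega)]
    simp
  · rw [List.getElem?_eq_none (by simpa using by omega), if_neg (by omega)]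
    rfl

-- the value written by both programs at cell (i, j)
def pvCell (N : Int) (final init : List Int) (i j : Int) : Option Int :=
  if j ≤ i - N + 1 then some (PySem.List.pyGetD final j 0)
  else if i < j then some (PySem.List.pyGetD init j 0)
  else none

-- the matrix row after columns 0..c-1 have been filled
def pvPRow (N : Int) (final init : List Int) (c i : Int) : List (Option Int) :=
  (PySem.List.pyRange 0 N).map (fun j => if j < c then pvCell N final init i j else none)

-- one iteration of A's outer column loop (acting on one of the two matrices)
def pvColOp (N numStates : Int) (final init : List Int)
    (M : List (List (Option Int))) (j : Int) : List (List (Option Int)) :=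
  let initj := PySem.List.pyGetD init j 0
  let finalj := PySem.List.pyGetD final j 0
  let M1 := (PySem.List.pyRange 0 j).foldl
    (fun M i => M.modify i.toNat (fun row => row.set j.toNat (some initj))) M
  (PySem.List.pyRange (N + j - 1) numStates).foldl
    (fun M i => M.modify i.toNat (fun row => row.set j.toNat (some finalj))) M1

theorem pvPRow_succ (N : Int) (final init : List Int) (c : Int) (hc : 0 ≤ c) (hcN : c < N)
    (k : Int) :
    pvPRow N final init (c + 1) k =
      if c ≤ k - N + 1 then (pvPRow N final init c k).set c.toNat (some (PySem.List.pyGetD final c 0))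
      else if k < c then (pvPRow N final init c k).set c.toNat (some (PySem.List.pyGetD init c 0))
      else pvPRow N final init c k := by
  refine List.ext_getElem? fun m => ?_
  by_cases hm : ((m : Nat) : Int) = c
  · subst hm
    split_ifs <;>
      (simp only [pvPRow, pvCell, List.getElem?_set, pvMapRange_getElem?, List.length_map,
        PySem.List.length_pyRange_one];
       split_ifs <;> first | rfl | omega)
  · split_ifs <;>
      (simp only [pvPRow, pvCell, List.getElem?_set, pvMapRange_getElem?, List.length_map,
        PySem.List.length_pyRange_one];
       split_ifs <;> first | rfl | omega)

theorem pvColOp_step (N : Int) (final init : List Int) (hN : 1 ≤ N) (c : Int)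
    (hc : 0 ≤ c) (hcN : c < N) :
    pvColOp N (2 * N - 1) final init
        ((PySem.List.pyRange 0 (2 * N - 1)).map (pvPRow N final init c)) c
      = (PySem.List.pyRange 0 (2 * N - 1)).map (pvPRow N final init (c + 1)) := by
  refine List.ext_getElem? fun k => ?_
  simp only [pvColOp]
  rw [pvFoldModify_getElem?' _ (N + c - 1) (2 * N - 1) (by omega),
      pvFoldModify_getElem?' _ 0 c (le_refl 0),
      pvMapRange_getElem?, pvMapRange_getElem?,
      pvPRow_succ N final init c hc hcN (k : Int)]
  split_ifs <;> first | rfl | omega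

theorem pvFoldCols (N : Int) (final init : List Int) (hN : 1 ≤ N) (c : Nat) (hc : (c : Int) ≤ N) :
    (PySem.List.pyRange 0 (c : Int)).foldl (pvColOp N (2 * N - 1) final init)
        (pvEmptyStateBounds (2 * N - 1) N)
      = (PySem.List.pyRange 0 (2 * N - 1)).map (pvPRow N final init (c : Int)) := by
  induction c with
  | zero =>
      rw [show ((0 : Nat) : Int) = 0 by rfl, PySem.List.pyRange_one_eq_nil le_rfl]
      simp only [List.foldl_nil, pvEmptyStateBounds]
      refine List.map_congr_left (fun i _ => ?_)
      refine List.map_congr_left (fun j hj => ?_)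
      rw [if_neg (by have := (PySem.List.mem_pyRange_one.mp hj).1; omega)]
  | succ c ih =>
      rw [show ((c + 1 : Nat) : Int) = (c : Int) + 1 by push_cast; ring,
          PySem.List.pyRange_one_succ_right (by omega), List.foldl_append]
      simp only [List.foldl_cons, List.foldl_nil]
      rw [ih (by omega), pvColOp_step N final init hN (c : Int) (by omega) (by omega)]

theorem pvModPair (g : List (Option Int) → List (Option Int)) (js : List Int)
    (a b : List (List (Option Int))) :
    js.foldl (fun p i => (p.1.modify i.toNat g, p.2.modify i.toNat g)) (a, b)
      = (js.foldl (fun M i => M.modify i.toNat g) a, js.foldl (fun M i => M.modify i.toNat g) b) := by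
  induction js generalizing a b with
  | nil => rfl
  | cons x xs ih => simpa using ih _ _

theorem pvPairFold_eq (N numStates : Int) (final init : List Int) (js : List Int)
    (a b : List (List (Option Int))) :
    js.foldl (fun lu j =>
      List.foldl
        (fun p i =>
          (p.1.modify i.toNat fun row => row.set j.toNat (some (PySem.List.pyGetD final j 0)),
           p.2.modify i.toNat fun row => row.set j.toNat (some (PySem.List.pyGetD final j 0))))
        (List.foldl
          (fun p i =>
            (p.1.modify i.toNat fun row => row.set j.toNat (some (PySem.List.pyGetD init j 0)),
             p.2.modify i.toNat fun row => row.set j.toNat (some (PySem.List.pyGetD init j 0))))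
          lu (PySem.List.pyRange 0 j))
        (PySem.List.pyRange (N + j - 1) numStates)) (a, b)
      = (js.foldl (pvColOp N numStates final init) a, js.foldl (pvColOp N numStates final init) b) := by
  induction js generalizing a b with
  | nil => rfl
  | cons x xs ih =>
      simp only [List.foldl_cons]
      rw [pvModPair, pvModPair]
      exact ih _ _

theorem pvGetD_reverse (l : List Int) (i : Int) (h0 : 0 ≤ i) (h1 : i < (l.length : Int)) :
    PySem.List.pyGetD l.reverse i 0 = PySem.List.pyGetD l ((l.length : Int) - 1 - i) 0 := by
  rw [PySem.List.pyGetD_eq_getElem _ 0 h0 (by rw [List.length_reverse]; omega),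
      PySem.List.pyGetD_eq_getElem _ 0 (by omega) (by omega),
      List.getElem_reverse]
  congr 1
  omega

theorem pvInit_eq (end_md : List Int) :
    pvInitialCounts end_md =
      (PySem.List.pyRange 0 (end_md.length : Int)).map (fun j =>
        if j = 0 then (0 : Int)
        else max 0 (PySem.List.pyGetD end_md ((end_md.length : Int) - j) 0 -
                    PySem.List.pyGetD end_md ((end_md.length : Int) - 1 - j) 0)) := by
  simp only [pvInitialCounts, List.map_id', List.length_reverse]
  refine List.ext_getElem? fun k => ?_
  rw [pvFoldSet_getElem?' _ 1 ((end_md.length : Nat) : Int) (by omega), pvMapRange_getElem?]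
  by_cases hk : k < end_md.length
  · by_cases hk0 : k = 0
    · subst hk0
      rw [if_neg (by omega), if_pos (by omega)]
      rw [List.getElem?_map,
          List.getElem?_eq_getElem (show 0 < end_md.reverse.length by rw [List.length_reverse]; omega)]
      simp
    · rw [if_pos ⟨by omega, by omega, by rw [List.length_map, List.length_reverse]; omega⟩,
          if_pos (by omega), if_neg (by omega),
          pvGetD_reverse end_md ((k : Int) - 1) (by omega) (by omega),
          pvGetD_reverse end_md (k : Int) (by omega) (by omega),
          show ((end_md.length : Int) - 1 - ((k : Int) - 1)) = (end_md.length : Int) - (k : Int) from by ring]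
  · rw [if_neg (by simp only [List.length_map, List.length_reverse]; omega), if_neg (by omega),
        List.getElem?_map, List.getElem?_eq_none (by rw [List.length_reverse]; omega)]
    rfl

-- A equals the canonical form
theorem pvA_canon (end_md : List Int) (total_sub_batches : Int) :
    bw1_eq14_state_bounds_from_forward_end_md_py end_md total_sub_batches =
      pvCanon end_md total_sub_batches := by
  by_cases h0 : end_md = []
  · subst h0; rfl
  · have hlen : 1 ≤ end_md.length := List.length_pos_of_ne_nil h0
    have hfinal : (PySem.List.pyRange 0 (end_md.length : Int)).map
        (fun j => PySem.List.pyGetD (end_md.map (fun v => max 0 (total_sub_batches - v)))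
          ((end_md.length : Int) - 1 - j) 0)
        = (PySem.List.pyRange 0 (end_md.length : Int)).map
        (fun j => max 0 (total_sub_batches - PySem.List.pyGetD end_md ((end_md.length : Int) - 1 - j) 0)) := by
      refine List.map_congr_left fun j hj => ?_
      have hjr := PySem.List.mem_pyRange_one.mp hj
      rw [PySem.List.pyGetD_eq_getElem _ 0 (by omega) (by rw [List.length_map]; omega),
          PySem.List.pyGetD_eq_getElem _ 0 (by omega) (by omega),
          List.getElem_map]
    have hinit := pvInit_eq end_md
    have hmat : (PySem.List.pyRange 0 (end_md.length : Int)).foldl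
        (pvColOp (end_md.length : Int) (2 * (end_md.length : Int) - 1)
          ((PySem.List.pyRange 0 (end_md.length : Int)).map
            (fun j => max 0 (total_sub_batches - PySem.List.pyGetD end_md ((end_md.length : Int) - 1 - j) 0)))
          (pvInitialCounts end_md))
        (pvEmptyStateBounds (2 * (end_md.length : Int) - 1) (end_md.length : Int))
        = (PySem.List.pyRange 0 (2 * (end_md.length : Int) - 1)).map
          (pvBRow (end_md.length : Int)
            ((PySem.List.pyRange 0 (end_md.length : Int)).map
              (fun j => max 0 (total_sub_batches - PySem.List.pyGetD end_md ((end_md.length : Int) - 1 - j) 0)))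
            (pvInitialCounts end_md)) := by
      rw [pvFoldCols _ _ _ (by omega) end_md.length (le_refl _)]
      refine List.map_congr_left fun i _ => ?_
      refine List.map_congr_left fun j hj => ?_
      rw [if_pos (PySem.List.mem_pyRange_one.mp hj).2]
      rfl
    simp only [bw1_eq14_state_bounds_from_forward_end_md_py, pvCanon, List.map_id', hfinal]
    rw [pvPairFold_eq, hmat]
    simp only [hinit]

-- ===== B-side lemmas =====

theorem pvB_final (end_md : List Int) (t : Int) :
    end_md.reverse.map (fun v => max 0 (t - v))
      = (PySem.List.pyRange 0 (end_md.length : Int)).map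
          (fun j => max 0 (t - PySem.List.pyGetD end_md ((end_md.length : Int) - 1 - j) 0)) := by
  refine List.ext_getElem? fun k => ?_
  rw [pvMapRange_getElem?, List.getElem?_map]
  by_cases hk : k < end_md.length
  · rw [if_pos (by omega),
        List.getElem?_eq_getElem (show k < end_md.reverse.length by rw [List.length_reverse]; omega),
        List.getElem_reverse,
        PySem.List.pyGetD_eq_getElem _ 0 (by omega) (by omega)]
    simp only [Option.map_some,
      show end_md.length - 1 - k = ((end_md.length : Int) - 1 - (k : Int)).toNat from by omega]
  · rw [if_neg (by omega), List.getElem?_eq_none (by rw [List.length_reverse]; omega)]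
    rfl

theorem pvB_init (end_md : List Int) (he : 1 ≤ end_md.length) :
    (0 : Int) :: ((end_md.reverse.zip end_md.reverse.tail).map (fun p => max 0 (p.1 - p.2)))
      = (PySem.List.pyRange 0 (end_md.length : Int)).map (fun j =>
          if j = 0 then (0 : Int)
          else max 0 (PySem.List.pyGetD end_md ((end_md.length : Int) - j) 0 -
                      PySem.List.pyGetD end_md ((end_md.length : Int) - 1 - j) 0)) := by
  refine List.ext_getElem? fun k => ?_
  rw [pvMapRange_getElem?]
  cases k with
  | zero => rw [if_pos (by omega)]; simp
  | succ m =>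
      have hzl : (end_md.reverse.zip end_md.reverse.tail).length = end_md.length - 1 := by
        simp [List.length_zip, List.length_reverse]
      rw [List.getElem?_cons_succ, List.getElem?_map]
      by_cases hm : m < end_md.length - 1
      · rw [if_pos (by omega), if_neg (by omega),
            List.getElem?_eq_getElem (by omega : m < (end_md.reverse.zip end_md.reverse.tail).length),
            PySem.List.pyGetD_eq_getElem _ 0 (by omega) (by omega),
            PySem.List.pyGetD_eq_getElem _ 0 (by omega) (by omega)]
        simp only [Option.map_some, List.getElem_zip, List.getElem_tail, List.getElem_reverse,
          show end_md.length - 1 - m = ((end_md.length : Int) - ((m + 1 : Nat) : Int)).toNat from by omega,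
          show end_md.length - 1 - (m + 1) = ((end_md.length : Int) - 1 - ((m + 1 : Nat) : Int)).toNat from by omega]
      · rw [if_neg (by omega), List.getElem?_eq_none (by omega)]
        rfl

theorem pvB_row0 (n : Int) (hn : 1 ≤ n) (Lf Li : List Int) :
    (if n = 1 then
        ((PySem.List.pyRange 1 n).foldl
          (fun r j => r.set j.toNat (some (PySem.List.pyGetD Li j 0)))
          (List.replicate n.toNat (none : Option Int))).set 0 (some (PySem.List.pyGetD Lf 0 0))
      else (PySem.List.pyRange 1 n).foldl
          (fun r j => r.set j.toNat (some (PySem.List.pyGetD Li j 0)))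
          (List.replicate n.toNat (none : Option Int)))
      = pvBRow n Lf Li 0 := by
  by_cases h1 : n = 1
  · subst h1
    rw [if_pos rfl, PySem.List.pyRange_one_eq_nil le_rfl]
    simp only [List.foldl_nil, Int.toNat_one, List.replicate_one, List.set_cons_zero]
    simp [pvBRow, PySem.List.pyRange_one]
  · rw [if_neg h1]
    refine List.ext_getElem? fun k => ?_
    rw [pvFoldSet_getElem?' (fun j => some (PySem.List.pyGetD Li j 0)) 1 n (by omega)]
    simp only [pvBRow, pvMapRange_getElem?, List.length_replicate, List.getElem?_replicate]
    split_ifs <;> first | rfl | omega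

theorem pvMapRange_set {α : Type} (f : Int → α) (N : Int) (p : Int) (hp : 0 ≤ p) (v : α) :
    (((PySem.List.pyRange 0 N).map f).set p.toNat v)
      = (PySem.List.pyRange 0 N).map (fun j => if j = p then v else f j) := by
  refine List.ext_getElem? fun k => ?_
  rw [List.getElem?_set, pvMapRange_getElem?, pvMapRange_getElem?, List.length_map,
      PySem.List.length_pyRange_one]
  split_ifs <;> first | rfl | omega

theorem pvB_step (n : Int) (Lf : List Int) (Li : List Int) (i : Int)
    (h1 : 1 ≤ i) (h2 : i < 2 * n - 1) :
    (if 0 ≤ i - n + 1 then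
        (if i < n then (pvBRow n Lf Li (i - 1)).set i.toNat none else pvBRow n Lf Li (i - 1)).set
          (i - n + 1).toNat (some (PySem.List.pyGetD Lf (i - n + 1) 0))
      else (if i < n then (pvBRow n Lf Li (i - 1)).set i.toNat none else pvBRow n Lf Li (i - 1)))
      = pvBRow n Lf Li i := by
  have hn : 2 ≤ n := by omega
  simp only [pvBRow]
  by_cases hA : 0 ≤ i - n + 1 <;> by_cases hB : i < n
  · rw [if_pos hA, if_pos hB, pvMapRange_set _ n i (by omega),
        pvMapRange_set _ n (i - n + 1) (by omega)]
    refine List.map_congr_left fun j hj => ?_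
    have hjm := PySem.List.mem_pyRange_one.mp hj
    split_ifs <;> first | rfl | omega | (subst_vars; rfl)
  · rw [if_pos hA, if_neg hB, pvMapRange_set _ n (i - n + 1) (by omega)]
    refine List.map_congr_left fun j hj => ?_
    have hjm := PySem.List.mem_pyRange_one.mp hj
    split_ifs <;> first | rfl | omega | (subst_vars; rfl)
  · rw [if_neg hA, if_pos hB, pvMapRange_set _ n i (by omega)]
    refine List.map_congr_left fun j hj => ?_
    have hjm := PySem.List.mem_pyRange_one.mp hj
    split_ifs <;> first | rfl | omega
  · rw [if_neg hA, if_neg hB]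
    refine List.map_congr_left fun j hj => ?_
    have hjm := PySem.List.mem_pyRange_one.mp hj
    split_ifs <;> first | rfl | omega

theorem pvB_fold (n : Int) (Lf Li : List Int) (_hn : 1 ≤ n) (c : Nat) (hc : (c : Int) ≤ 2 * n - 2) :
    (PySem.List.pyRange 1 (1 + (c : Int))).foldl
      (fun (st : List (Option Int) × List (List (Option Int))) i =>
        let r1 := if i < n then st.1.set i.toNat none else st.1
        let r2 := if 0 ≤ i - n + 1 then
            r1.set (i - n + 1).toNat (some (PySem.List.pyGetD Lf (i - n + 1) 0))
          else r1
        (r2, st.2 ++ [r2]))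
      (pvBRow n Lf Li 0, [pvBRow n Lf Li 0])
      = (pvBRow n Lf Li (c : Int), (PySem.List.pyRange 0 ((c : Int) + 1)).map (pvBRow n Lf Li)) := by
  induction c with
  | zero =>
      rw [show (1 + ((0 : Nat) : Int)) = 1 by simp, PySem.List.pyRange_one_eq_nil le_rfl]
      simp only [List.foldl_nil, Nat.cast_zero]
      rw [show ((0 : Int) + 1) = 0 + 1 by ring, PySem.List.pyRange_one_succ_right (by omega),
          PySem.List.pyRange_one_eq_nil le_rfl]
      rfl
  | succ c ih =>
      have hstep := pvB_step n Lf Li ((c : Int) + 1) (by omega) (by omega)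
      rw [show ((c : Int) + 1 - 1) = (c : Int) by ring] at hstep
      rw [show (1 + ((c + 1 : Nat) : Int)) = (1 + (c : Int)) + 1 by push_cast; ring,
          PySem.List.pyRange_one_succ_right (by omega), List.foldl_append, ih (by omega)]
      simp only [List.foldl_cons, List.foldl_nil]
      simp only [show (1 + (c : Int)) = (c : Int) + 1 from by ring, hstep]
      rw [show ((c + 1 : Nat) : Int) = (c : Int) + 1 by push_cast; ring,
          PySem.List.pyRange_one_succ_right (show (0 : Int) ≤ (c : Int) + 1 by omega),
          List.map_append]
      rfl
-- B equals the canonical form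
theorem pvB_canon (end_md : List Int) (total_sub_batches : Int) :
    bw1_eq14_state_bounds_from_forward_end_md_py_alt end_md total_sub_batches =
      pvCanon end_md total_sub_batches := by
  by_cases h0 : end_md = []
  · subst h0; rfl
  · have hlen : 1 ≤ end_md.length := List.length_pos_of_ne_nil h0
    simp only [bw1_eq14_state_bounds_from_forward_end_md_py_alt, pvCanon, List.map_id',
      List.length_reverse]
    rw [if_neg (by omega : ¬ ((end_md.length : Int) = 0))]
    rw [pvB_final end_md total_sub_batches, pvB_init end_md hlen]
    rw [show (end_md.reverse.map (fun _ => (none : Option Int)))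
          = List.replicate ((end_md.length : Int)).toNat (none : Option Int) by
        simp [List.map_const']]
    rw [pvB_row0 (end_md.length : Int) (by omega)]
    have hfold := pvB_fold (end_md.length : Int)
      ((PySem.List.pyRange 0 (end_md.length : Int)).map
        (fun j => max 0 (total_sub_batches - PySem.List.pyGetD end_md ((end_md.length : Int) - 1 - j) 0)))
      ((PySem.List.pyRange 0 (end_md.length : Int)).map (fun j =>
        if j = 0 then (0 : Int)
        else max 0 (PySem.List.pyGetD end_md ((end_md.length : Int) - j) 0 -
                    PySem.List.pyGetD end_md ((end_md.length : Int) - 1 - j) 0)))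
      (by omega) (2 * end_md.length - 2) (by omega)
    rw [show (1 + ((2 * end_md.length - 2 : Nat) : Int)) = 2 * (end_md.length : Int) - 1 by
          omega] at hfold
    rw [show (((2 * end_md.length - 2 : Nat) : Int) + 1) = 2 * (end_md.length : Int) - 1 by
          omega] at hfold
    rw [hfold]

-- ===== VERDICT (by name: the statement is the Claim_ definition above) =====
theorem bw1_eq14_state_bounds_from_forward_end_md_py_spec : Claim_equal_bw1_eq14_state_bounds_from_forward_end_md_py := by
  intro end_md total_sub_batches _
  unfold Spec_bw1_eq14_state_bounds_from_forward_end_md_py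
  rw [pvA_canon, pvB_canon]
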